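-- pv_equiv track=rewrite | github.com/BohanHsu/developer | ccii/prac_chap1.py | fn12v1
-- ===== SOURCE A (Python) =====
-- def fn12v1(array):
-- 	length = len(array)
-- 	if length%2 == 0:
-- 		mid = length/2 - 1
-- 	else:
-- 		mid = (length - 1)/2 - 1
--
-- 	for i in range(0,int(mid)):
-- 		temp = array[i]
-- 		array[i] = array[length - 1 - i]
-- 		array[length - 1 - i] = temp
--
-- 	return array
-- ===== SOURCE B (Python) =====
-- def fn12v1(array):
--     n = len(array)
--     k = max(n // 2 - 1, 0)
--     array[:] = array[n - k:][::-1] + array[k:n - k] + array[:k][::-1]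
--     return array
-- ===== Notes on version B (the rewrite author's own statement) =====
-- stated objective: alternative
-- what changed: Replaces the index-by-index swap loop with a single whole-list reconstruction from the two reversed edge slices plus the untouched middle slice, assigned in place via array[:] =.
import Mathlib
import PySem

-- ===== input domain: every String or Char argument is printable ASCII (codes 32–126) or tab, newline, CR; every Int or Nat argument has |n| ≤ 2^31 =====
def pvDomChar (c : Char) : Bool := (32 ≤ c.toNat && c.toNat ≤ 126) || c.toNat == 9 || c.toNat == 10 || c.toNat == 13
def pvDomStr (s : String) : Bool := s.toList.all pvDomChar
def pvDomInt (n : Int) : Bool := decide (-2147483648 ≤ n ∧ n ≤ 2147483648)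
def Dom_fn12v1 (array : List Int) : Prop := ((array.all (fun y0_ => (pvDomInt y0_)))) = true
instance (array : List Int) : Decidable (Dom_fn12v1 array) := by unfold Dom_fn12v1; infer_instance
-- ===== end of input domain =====

-- B replaces A's pairwise swap loop by one reconstruction from reversed edge slices plus the untouched middle (alternative decomposition, same cost).
-- A mutates its argument in place; the equivalence proved here is about the RETURN value (B performs the same in-place update via array[:] =).


-- ===== PORT A =====
-- Python computes mid with float '/' then truncates via int(); both branch values are integral
-- floats (exact on this domain), so int(length/2 - 1) = int(length/2) - 1 = truncdiv length 2 - 1.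
-- The loop's indices i and length-1-i are always in range (0 ≤ i < mid < length/2), so the
-- total forms pyGetD/pySetD are exact here (Python never raises).
def fn12v1 (array : List Int) : List Int :=
  let length : Int := (array.length : Int)
  let mid : Int :=
    if PySem.Int.mod length 2 = 0 then PySem.Int.truncdiv length 2 - 1
    else PySem.Int.truncdiv (length - 1) 2 - 1
  (PySem.List.pyRange 0 mid 1).foldl
    (fun arr i =>
      let temp := PySem.List.pyGetD arr i 0
      let arr1 := PySem.List.pySetD arr i (PySem.List.pyGetD arr (length - 1 - i) 0)
      PySem.List.pySetD arr1 (length - 1 - i) temp)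
    array

-- ===== PORT B =====
def fn12v1_alt (array : List Int) : List Int :=
  let n : Int := (array.length : Int)
  let k : Int := max (PySem.Int.floordiv n 2 - 1) 0
  (PySem.List.slice array (some (n - k)) none).reverse
    ++ PySem.List.slice array (some k) (some (n - k))
    ++ (PySem.List.slice array none (some k)).reverse

-- ===== PRECONDITION & SPEC =====
def Spec_fn12v1 (array : List Int) (out : List Int) : Prop := out = fn12v1_alt array
instance (array : List Int) (out : List Int) : Decidable (Spec_fn12v1 array out) := by unfold Spec_fn12v1; infer_instance

-- ===== CLAIM (what is proved, stated in full; the proofs are below) =====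
def Claim_equal_fn12v1 : Prop := ∀ (array : List Int), Dom_fn12v1 array → Spec_fn12v1 array (fn12v1 array)

-- ===== LEMMAS AND PROOFS =====

-- The state of A's loop after j swaps: reversed last j, untouched middle, reversed first j.
def pvState (l : List Int) (j : Nat) : List Int :=
  ((l.drop (l.length - j)).reverse) ++ ((l.take (l.length - j)).drop j) ++ ((l.take j).reverse)

-- A's loop body (the foldl lambda of fn12v1, let-reduced), with the original length n fixed.
def pvStep (n : Int) (arr : List Int) (i : Int) : List Int :=
  PySem.List.pySetD (PySem.List.pySetD arr i (PySem.List.pyGetD arr (n - 1 - i) 0)) (n - 1 - i)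
    (PySem.List.pyGetD arr i 0)

lemma pvState_zero (l : List Int) : pvState l 0 = l := by
  simp [pvState]

lemma pvGetD_concat (pre ys : List Int) (z : Int) :
    PySem.List.pyGetD (pre ++ z :: ys) (pre.length : Int) 0 = z := by
  rw [PySem.List.pyGetD_natCast]
  simp [List.getD_eq_getElem?_getD]

lemma pvSetD_concat (pre ys : List Int) (z v : Int) :
    PySem.List.pySetD (pre ++ z :: ys) (pre.length : Int) v = pre ++ v :: ys := by
  rw [PySem.List.pySetD_natCast, List.set_append]
  simp

-- One swap on a decomposed state exchanges the element after P with the one after P ++ x :: C.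
lemma pvStep_concat (P C Q : List Int) (x y : Int) (hQ : Q.length = P.length) :
    pvStep (((P.length + (C.length + (Q.length + 2)) : Nat) : Int))
      (P ++ x :: (C ++ y :: Q)) ((P.length : Nat) : Int)
      = P ++ y :: (C ++ x :: Q) := by
  have hidx : ((P.length + (C.length + (Q.length + 2)) : Nat) : Int) - 1 - (P.length : Int)
      = (((P ++ x :: C).length : Nat) : Int) := by simp; omega
  have assoc1 : P ++ x :: (C ++ y :: Q) = (P ++ x :: C) ++ y :: Q := by simp
  unfold pvStep
  rw [hidx]
  rw [show PySem.List.pyGetD (P ++ x :: (C ++ y :: Q)) (((P ++ x :: C).length : Nat) : Int) 0 = y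
      from by rw [assoc1]; exact pvGetD_concat _ _ _]
  rw [pvGetD_concat, pvSetD_concat]
  have assoc2 : P ++ y :: (C ++ y :: Q) = (P ++ y :: C) ++ y :: Q := by simp
  have hlen2 : ((P ++ x :: C).length : Int) = ((P ++ y :: C).length : Int) := by simp
  rw [assoc2, hlen2, pvSetD_concat]
  simp

-- The invariant step: one more iteration of A's loop extends the swapped edges by one.
lemma pvStep_state (l : List Int) (j : Nat) (hj : 2 * j + 2 ≤ l.length) :
    pvStep (l.length : Int) (pvState l j) (j : Int) = pvState l (j + 1) := by
  have h1 : j < l.length := by omega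
  have h2 : l.length - 1 - j < l.length := by omega
  set n := l.length with hn
  set P := (l.drop (n - j)).reverse with hP
  set C := (l.take (n - 1 - j)).drop (j + 1) with hC
  set Q := (l.take j).reverse with hQ
  have hPlen : P.length = j := by simp [hP]; omega
  have hClen : C.length = n - 2*j - 2 := by simp [hC]; omega
  have hQlen : Q.length = j := by simp [hQ]; omega
  have hmid : (l.take (n - j)).drop j = l[j] :: (C ++ [l[n - 1 - j]]) := by
    have e1 : n - j = (n - 1 - j) + 1 := by omega
    rw [e1, List.take_add_one, List.getElem?_eq_getElem (by omega)]
    simp only [Option.toList_some]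
    rw [List.drop_append_of_le_length (by simp; omega),
        List.drop_eq_getElem_cons (by simp [hn]; omega)]
    simp [hC]
  have hSj : pvState l j = P ++ l[j] :: (C ++ l[n - 1 - j] :: Q) := by
    rw [pvState, ← hn, hmid]
    simp only [List.append_assoc, List.cons_append, List.nil_append]
    rfl
  have hSj1 : pvState l (j + 1) = P ++ l[n - 1 - j] :: (C ++ l[j] :: Q) := by
    rw [pvState, ← hn]
    have e2 : n - (j + 1) = (n - 1 - j) := by omega
    rw [e2]
    rw [List.drop_eq_getElem_cons (h := h2)]
    rw [List.take_add_one, List.getElem?_eq_getElem h1]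
    have e3 : (n - 1 - j) + 1 = n - j := by omega
    rw [e3]
    simp [hP, hC, hQ]
  rw [hSj, hSj1]
  have hntot : (n : Int) = ((P.length + (C.length + (Q.length + 2)) : Nat) : Int) := by
    rw [hPlen, hClen, hQlen]; omega
  have hjcast : ((j : Nat) : Int) = ((P.length : Nat) : Int) := by rw [hPlen]
  rw [hntot, hjcast]
  exact pvStep_concat P C Q _ _ (by omega)

-- A's whole loop, by induction on the number of iterations.
lemma pvLoop_state (l : List Int) (k : Nat) (hk : 2 * k ≤ l.length) :
    (PySem.List.pyRange 0 (k : Int) 1).foldl (pvStep (l.length : Int)) l = pvState l k := by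
  induction k with
  | zero => simp [PySem.List.pyRange_one_eq_nil le_rfl, pvState_zero]
  | succ k ih =>
    have hcast : ((k + 1 : Nat) : Int) = (k : Int) + 1 := by push_cast; ring
    rw [hcast, PySem.List.pyRange_one_succ_right (by positivity), List.foldl_append, ih (by omega)]
    simpa using pvStep_state l k (by omega)

lemma pvA_eq (l : List Int) : fn12v1 l = pvState l (l.length / 2 - 1) := by
  have hmid : (if PySem.Int.mod (l.length : Int) 2 = 0
        then PySem.Int.truncdiv (l.length : Int) 2 - 1
        else PySem.Int.truncdiv ((l.length : Int) - 1) 2 - 1)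
      = ((l.length : Int)) / 2 - 1 := by
    rcases Nat.even_or_odd l.length with ⟨m, hm⟩ | ⟨m, hm⟩
    · rw [if_pos]
      · simp [PySem.Int.truncdiv]
      · rw [PySem.Int.mod_eq_emod_of_pos (by omega : (0:Int) < 2)]; omega
    · rw [if_neg]
      · rw [show ((l.length : Int) - 1) = ((l.length - 1 : Nat) : Int) by omega]
        rw [show PySem.Int.truncdiv ((l.length - 1 : Nat) : Int) 2
            = (((l.length - 1) / 2 : Nat) : Int) by simp [PySem.Int.truncdiv]]
        omega
      · rw [PySem.Int.mod_eq_emod_of_pos (by omega : (0:Int) < 2)]; omega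
  have hrange : PySem.List.pyRange 0 ((l.length : Int) / 2 - 1) 1
      = PySem.List.pyRange 0 ((l.length / 2 - 1 : Nat) : Int) 1 := by
    by_cases h : 2 ≤ l.length
    · congr 1; omega
    · rw [PySem.List.pyRange_one_eq_nil (by omega), PySem.List.pyRange_one_eq_nil (by omega)]
  show (PySem.List.pyRange 0 _ 1).foldl (pvStep (l.length : Int)) l = _
  rw [hmid, hrange]
  exact pvLoop_state l (l.length / 2 - 1) (by omega)

lemma pvB_eq (l : List Int) : fn12v1_alt l = pvState l (l.length / 2 - 1) := by
  have hk : max (PySem.Int.floordiv (l.length : Int) 2 - 1) 0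
      = ((l.length / 2 - 1 : Nat) : Int) := by
    rw [PySem.Int.floordiv_eq_ediv_of_pos (by omega : (0:Int) < 2)]
    omega
  show (PySem.List.slice l (some ((l.length : Int) - _)) none).reverse
      ++ PySem.List.slice l (some _) (some ((l.length : Int) - _))
      ++ (PySem.List.slice l none (some _)).reverse = _
  rw [hk]
  have hsub : (l.length : Int) - ((l.length / 2 - 1 : Nat) : Int)
      = ((l.length - (l.length / 2 - 1) : Nat) : Int) := by omega
  rw [hsub, PySem.List.slice_from_natCast, PySem.List.slice_natCast,
      PySem.List.slice_to_natCast, pvState, List.drop_take]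

-- ===== VERDICT (by name: the statement is the Claim_ definition above) =====
theorem fn12v1_spec : Claim_equal_fn12v1 := by
  intro l _
  show fn12v1 l = fn12v1_alt l
  rw [pvA_eq, pvB_eq]
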